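-- pv_equiv track=rewrite | github.com/R0llcre/Clinical-Trial-Matching-Assistant | apps/worker/services/llm_eligibility_parser.py | _supplement_critical_fields
-- ===== SOURCE A (Python) =====
-- from typing import Any, Dict, List, Optional, Sequence, Set, Tuple
--
-- def _supplement_critical_fields(
--     primary_rules: Sequence[Dict[str, Any]],
--     fallback_rules: Sequence[Dict[str, Any]],
--     critical_fields: Set[str],
-- ) -> Tuple[List[Dict[str, Any]], int, List[str]]:
--     if not critical_fields:
--         return list(primary_rules), 0, []
--
--     merged = list(primary_rules)
--     present_fields = {
--         str(rule.get("field") or "").strip().lower()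
--         for rule in primary_rules
--         if isinstance(rule, dict)
--     }
--     supplemented_fields: List[str] = []
--     added = 0
--
--     for field in sorted(critical_fields):
--         if field in present_fields:
--             continue
--         field_rules = [
--             rule
--             for rule in fallback_rules
--             if isinstance(rule, dict)
--             and str(rule.get("field") or "").strip().lower() == field
--         ]
--         if not field_rules:
--             continue
--         merged.extend(field_rules)
--         added += len(field_rules)
--         supplemented_fields.append(field)
--     return merged, added, supplemented_fields
-- ===== SOURCE B (Python) =====
-- def _norm(rule):
--     return str(rule.get("field") or "").strip().lower()
--
--
-- def _supplement_critical_fields(primary_rules, fallback_rules, critical_fields):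
--     present = {_norm(r) for r in primary_rules if isinstance(r, dict)}
--     groups = {}
--     for rule in fallback_rules:
--         if isinstance(rule, dict):
--             groups.setdefault(_norm(rule), []).append(rule)
--     merged = list(primary_rules)
--     supplemented = []
--     for field in sorted(critical_fields):
--         if field in present:
--             continue
--         rules = groups.get(field)
--         if rules:
--             merged += rules
--             supplemented.append(field)
--     added = len(merged) - len(primary_rules)
--     return merged, added, supplemented
-- ===== Notes on version B (the rewrite author's own statement) =====
-- stated objective: faster
-- what changed: B groups the fallback rules by normalized field into a dict in one pass and looks each missing critical field up, instead of re-scanning all fallback rules for every critical field; the added count is recovered from the length difference instead of an accumulator.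
import Mathlib
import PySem

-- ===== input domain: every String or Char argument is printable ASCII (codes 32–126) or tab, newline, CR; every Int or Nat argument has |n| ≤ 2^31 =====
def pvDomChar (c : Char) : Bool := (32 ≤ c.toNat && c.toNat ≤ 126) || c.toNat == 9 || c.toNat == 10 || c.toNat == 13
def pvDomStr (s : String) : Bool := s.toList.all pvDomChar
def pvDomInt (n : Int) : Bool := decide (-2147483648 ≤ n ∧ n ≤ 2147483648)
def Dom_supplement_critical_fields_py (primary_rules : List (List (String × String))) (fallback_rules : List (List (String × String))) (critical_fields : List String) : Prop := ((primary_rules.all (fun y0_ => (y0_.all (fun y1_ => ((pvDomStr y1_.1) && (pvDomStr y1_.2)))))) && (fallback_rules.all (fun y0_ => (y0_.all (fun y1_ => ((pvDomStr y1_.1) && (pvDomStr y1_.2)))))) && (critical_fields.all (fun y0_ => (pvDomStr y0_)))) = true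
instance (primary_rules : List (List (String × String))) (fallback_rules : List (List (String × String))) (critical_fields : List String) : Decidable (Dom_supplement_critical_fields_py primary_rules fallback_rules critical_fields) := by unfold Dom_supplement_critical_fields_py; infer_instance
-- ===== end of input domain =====

-- B groups the fallback rules by normalized field into a dict in one pass and looks each
-- missing critical field up, instead of re-scanning all fallback rules per critical field
-- (objective: faster, O(F + C log C) instead of O(C*F)).

-- shared helper: str(rule.get("field") or "").strip().lower()  (values are strings, so str(x) = x;
-- 'or ""' maps a missing key to "", and "" stays "")
def pvNorm (rule : List (String × String)) : String :=
  PySem.Str.lower (PySem.Str.strip (((PySem.Dict.mk rule).get? "field").getD ""))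

-- ===== PORT A =====
def supplement_critical_fields_py (primary_rules : List (List (String × String))) (fallback_rules : List (List (String × String))) (critical_fields : List String) : (List (List (String × String))) × Int × List String :=
  if critical_fields = [] then (primary_rules, 0, [])
  else
    let present : PySem.Set String := PySem.Set.ofList (primary_rules.map pvNorm)
    (PySem.List.sorted critical_fields (fun x => x) false).foldl
      (fun (st : (List (List (String × String))) × Int × List String) field =>
        if present.contains field then st
        else
          let field_rules := fallback_rules.filter (fun rule => pvNorm rule == field)
          if field_rules = [] then st
          else (st.1 ++ field_rules, st.2.1 + (field_rules.length : Int), st.2.2 ++ [field]))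
      (primary_rules, 0, [])

-- ===== PORT B =====
def supplement_critical_fields_py_alt (primary_rules : List (List (String × String))) (fallback_rules : List (List (String × String))) (critical_fields : List String) : (List (List (String × String))) × Int × List String :=
  let present : PySem.Set String := PySem.Set.ofList (primary_rules.map pvNorm)
  -- groups.setdefault(_norm(rule), []).append(rule)  ==  modify key [] (· ++ [rule])
  let groups : PySem.Dict String (List (List (String × String))) :=
    fallback_rules.foldl (fun d rule => d.modify (pvNorm rule) [] (· ++ [rule])) PySem.Dict.empty
  let st := (PySem.List.sorted critical_fields (fun x => x) false).foldl
    (fun (st : (List (List (String × String))) × List String) field =>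
      if present.contains field then st
      else
        match groups.get? field with
        | none => st
        | some rules => if rules = [] then st else (st.1 ++ rules, st.2 ++ [field]))
    (primary_rules, [])
  (st.1, (st.1.length : Int) - (primary_rules.length : Int), st.2)

-- ===== PRECONDITION & SPEC =====
def Spec_supplement_critical_fields_py (primary_rules : List (List (String × String))) (fallback_rules : List (List (String × String))) (critical_fields : List String) (out : (List (List (String × String))) × Int × List String) : Prop := out = supplement_critical_fields_py_alt primary_rules fallback_rules critical_fields
instance (primary_rules : List (List (String × String))) (fallback_rules : List (List (String × String))) (critical_fields : List String) (out : (List (List (String × String))) × Int × List String) : Decidable (Spec_supplement_critical_fields_py primary_rules fallback_rules critical_fields out) := by unfold Spec_supplement_critical_fields_py; infer_instance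

-- ===== CLAIM (what is proved, stated in full; the proofs are below) =====
def Claim_equal_supplement_critical_fields_py : Prop := ∀ (primary_rules : List (List (String × String))) (fallback_rules : List (List (String × String))) (critical_fields : List String), Dom_supplement_critical_fields_py primary_rules fallback_rules critical_fields → Spec_supplement_critical_fields_py primary_rules fallback_rules critical_fields (supplement_critical_fields_py primary_rules fallback_rules critical_fields)

-- ===== LEMMAS AND PROOFS =====

-- the grouping dict holds, under each field, exactly the fallback rules normalizing to it
lemma pv_groups_getD (f : List (List (String × String))) (field : String) :
    (f.foldl (fun d rule => d.modify (pvNorm rule) [] (· ++ [rule])) PySem.Dict.empty).getD field []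
      = f.filter (fun rule => pvNorm rule == field) := by
  have h := PySem.Dict.getD_foldl_modify_append
    (l := f.map (fun rule => (pvNorm rule, rule)))
    (d := (PySem.Dict.empty : PySem.Dict String (List (List (String × String))))) (c := field)
  rw [List.foldl_map] at h
  simpa [List.filter_map, Function.comp_def] using h

-- the two loops agree: A carries the running count, B recovers it from the length difference
lemma pv_loop_eq (f : List (List (String × String))) (present : PySem.Set String)
    (groups : PySem.Dict String (List (List (String × String))))
    (hg : ∀ field, groups.getD field [] = f.filter (fun rule => pvNorm rule == field))
    (plen : Nat) :
    ∀ (fields : List String) (m : List (List (String × String))) (s : List String),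
      fields.foldl
        (fun (st : (List (List (String × String))) × Int × List String) field =>
          if present.contains field then st
          else
            let field_rules := f.filter (fun rule => pvNorm rule == field)
            if field_rules = [] then st
            else (st.1 ++ field_rules, st.2.1 + (field_rules.length : Int), st.2.2 ++ [field]))
        (m, (m.length : Int) - (plen : Int), s)
      = ((fields.foldl
            (fun (st : (List (List (String × String))) × List String) field =>
              if present.contains field then st
              else
                match groups.get? field with
                | none => st
                | some rules => if rules = [] then st else (st.1 ++ rules, st.2 ++ [field]))
            (m, s)).1,
         ((fields.foldl
            (fun (st : (List (List (String × String))) × List String) field =>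
              if present.contains field then st
              else
                match groups.get? field with
                | none => st
                | some rules => if rules = [] then st else (st.1 ++ rules, st.2 ++ [field]))
            (m, s)).1.length : Int) - (plen : Int),
         (fields.foldl
            (fun (st : (List (List (String × String))) × List String) field =>
              if present.contains field then st
              else
                match groups.get? field with
                | none => st
                | some rules => if rules = [] then st else (st.1 ++ rules, st.2 ++ [field]))
            (m, s)).2) := by
  intro fields
  induction fields with
  | nil => intro m s; simp
  | cons field rest ih =>
    intro m s
    simp only [List.foldl_cons]
    by_cases hp : present.contains field
    · simp only [hp, if_pos]
      exact ih m s
    · simp only [hp, Bool.false_eq_true, if_false]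
      have hgf := hg field
      cases hq : groups.get? field with
      | none =>
        have hempty : f.filter (fun rule => pvNorm rule == field) = [] := by
          rw [← hgf, PySem.Dict.getD_eq_get?_getD, hq]
          rfl
        simp only [hempty, if_true]
        exact ih m s
      | some rules =>
        have hrules : rules = f.filter (fun rule => pvNorm rule == field) := by
          rw [← hgf, PySem.Dict.getD_eq_get?_getD, hq]
          rfl
        by_cases he : f.filter (fun rule => pvNorm rule == field) = []
        · simp only [he, if_pos]
          rw [hrules, he]
          simp only [if_true]
          exact ih m s
        · rw [hrules]
          simp only [he, if_false]
          have harith : ((m.length : Int) - (plen : Int)) + ((f.filter (fun rule => pvNorm rule == field)).length : Int)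
              = ((m ++ f.filter (fun rule => pvNorm rule == field)).length : Int) - (plen : Int) := by
            simp [List.length_append]; omega
          rw [harith]
          exact ih (m ++ f.filter (fun rule => pvNorm rule == field)) (s ++ [field])

-- ===== VERDICT (by name: the statement is the Claim_ definition above) =====
theorem supplement_critical_fields_py_spec : Claim_equal_supplement_critical_fields_py := by
  intro p f c _
  unfold Spec_supplement_critical_fields_py supplement_critical_fields_py supplement_critical_fields_py_alt
  by_cases hc : c = []
  · subst hc
    simp [PySem.List.sorted]
  · rw [if_neg hc]
    have h := pv_loop_eq f (PySem.Set.ofList (p.map pvNorm))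
      (f.foldl (fun d rule => d.modify (pvNorm rule) [] (· ++ [rule])) PySem.Dict.empty)
      (fun field => pv_groups_getD f field) p.length
      (PySem.List.sorted c (fun x => x) false) p []
    simpa using h
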